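-- pv_equiv track=rewrite | github.com/minhluxuan/Sysma | sycal.py | bestsell_time
-- ===== SOURCE A (Python) =====
-- def bestsell_time(sale_list, time_list): # 7-8, 8-9
--     max_product = sale_list[0]
--     list_bestseller = []
--     for i in range(len(sale_list)):
--         if sale_list[i] > max_product:
--             max_product = sale_list[i]
--     for i in range (len(sale_list)):
--         if sale_list[i] == max_product:
--             list_bestseller.append(time_list[i])
--     return list_bestseller
-- ===== SOURCE B (Python) =====
-- def bestsell_time(sale_list, time_list):
--     max_product = sale_list[0]
--     list_bestseller = []
--     for i in range(len(sale_list)):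
--         if sale_list[i] > max_product:
--             max_product = sale_list[i]
--             list_bestseller = [time_list[i]]
--         elif sale_list[i] == max_product:
--             list_bestseller.append(time_list[i])
--     return list_bestseller
-- ===== Notes on version B (the rewrite author's own statement) =====
-- stated objective: alternative
-- what changed: Replaces A's two passes (one to find the maximum, one to collect matching times) with a single pass that maintains the running maximum and rebuilds the best-time list whenever a strictly larger sale appears.
import Mathlib
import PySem

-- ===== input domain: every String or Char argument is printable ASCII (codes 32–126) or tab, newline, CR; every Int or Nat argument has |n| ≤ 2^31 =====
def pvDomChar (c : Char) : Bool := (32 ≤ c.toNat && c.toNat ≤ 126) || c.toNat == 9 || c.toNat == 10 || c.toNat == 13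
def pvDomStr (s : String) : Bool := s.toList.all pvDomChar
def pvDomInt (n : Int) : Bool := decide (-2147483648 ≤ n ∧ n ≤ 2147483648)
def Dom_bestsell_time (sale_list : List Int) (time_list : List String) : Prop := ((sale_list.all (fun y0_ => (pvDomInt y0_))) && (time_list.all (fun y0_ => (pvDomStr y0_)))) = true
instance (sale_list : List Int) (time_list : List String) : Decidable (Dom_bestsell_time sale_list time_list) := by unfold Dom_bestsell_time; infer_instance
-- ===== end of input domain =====

-- B: single pass maintaining the running maximum and the best-time list, instead of A's max pass + collection pass (objective: alternative).
-- ===== PORT A =====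
def bestsell_time (sale_list : List Int) (time_list : List String) : List String :=
  let max_product0 := PySem.List.pyGetD sale_list 0 0
  let max_product := (PySem.List.pyRange 0 (sale_list.length : Int) 1).foldl
    (fun m i => if PySem.List.pyGetD sale_list i 0 > m then PySem.List.pyGetD sale_list i 0 else m)
    max_product0
  (PySem.List.pyRange 0 (sale_list.length : Int) 1).foldl
    (fun acc i => if PySem.List.pyGetD sale_list i 0 = max_product then acc ++ [PySem.List.pyGetD time_list i ""] else acc)
    []

-- ===== PORT B =====
def bestsell_time_alt (sale_list : List Int) (time_list : List String) : List String :=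
  ((PySem.List.pyRange 0 (sale_list.length : Int) 1).foldl
    (fun (st : Int × List String) i =>
      if PySem.List.pyGetD sale_list i 0 > st.1 then
        (PySem.List.pyGetD sale_list i 0, [PySem.List.pyGetD time_list i ""])
      else if PySem.List.pyGetD sale_list i 0 = st.1 then
        (st.1, st.2 ++ [PySem.List.pyGetD time_list i ""])
      else st)
    (PySem.List.pyGetD sale_list 0 0, [])).2

-- ===== PRECONDITION & SPEC =====
-- Pre_ excludes exactly the inputs on which Python A raises: the empty sale_list (IndexError on
-- sale_list[0]) and inputs where some index holding the maximum sale is out of range for time_list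
-- (IndexError on time_list[i]).
def Pre_bestsell_time (sale_list : List Int) (time_list : List String) : Prop :=
  sale_list ≠ [] ∧
  ∀ i : Nat, i < sale_list.length →
    sale_list.getD i 0 = sale_list.foldl max (sale_list.headD 0) → i < time_list.length
instance (sale_list : List Int) (time_list : List String) : Decidable (Pre_bestsell_time sale_list time_list) := by unfold Pre_bestsell_time; infer_instance
def pvWitness_bestsell_time : List Int × List String := ([1, 3, 3, 2], ["7-8", "8-9", "9-10", "10-11"])
def Spec_bestsell_time (sale_list : List Int) (time_list : List String) (out : List String) : Prop := out = bestsell_time_alt sale_list time_list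
instance (sale_list : List Int) (time_list : List String) (out : List String) : Decidable (Spec_bestsell_time sale_list time_list out) := by unfold Spec_bestsell_time; infer_instance

-- ===== CLAIM (what is proved, stated in full; the proofs are below) =====
def Claim_equal_bestsell_time : Prop := ∀ (sale_list : List Int) (time_list : List String), Dom_bestsell_time sale_list time_list → Pre_bestsell_time sale_list time_list → Spec_bestsell_time sale_list time_list (bestsell_time sale_list time_list)

-- ===== LEMMAS AND PROOFS =====
-- abbreviations for the two programs' loop states (proof-only helpers)
def pvV (s : List Int) (i : Int) : Int := PySem.List.pyGetD s i 0
def pvT (t : List String) (i : Int) : String := PySem.List.pyGetD t i ""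
def pvMax (s : List Int) (n : Nat) : Int :=
  (PySem.List.pyRange 0 (n : Int) 1).foldl (fun m i => if pvV s i > m then pvV s i else m) (pvV s 0)
def pvFilt (s : List Int) (t : List String) (M : Int) (n : Nat) : List String :=
  (PySem.List.pyRange 0 (n : Int) 1).foldl (fun acc i => if pvV s i = M then acc ++ [pvT t i] else acc) []
def pvB (s : List Int) (t : List String) (n : Nat) : Int × List String :=
  (PySem.List.pyRange 0 (n : Int) 1).foldl
    (fun (st : Int × List String) i =>
      if pvV s i > st.1 then (pvV s i, [pvT t i])
      else if pvV s i = st.1 then (st.1, st.2 ++ [pvT t i])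
      else st)
    (pvV s 0, [])

lemma pvRange_succ (n : Nat) :
    PySem.List.pyRange 0 ((n + 1 : Nat) : Int) 1 = PySem.List.pyRange 0 (n : Int) 1 ++ [(n : Int)] := by
  push_cast
  exact PySem.List.pyRange_one_succ_right (by positivity)

lemma pvMax_succ (s : List Int) (n : Nat) :
    pvMax s (n + 1) = if pvV s n > pvMax s n then pvV s n else pvMax s n := by
  unfold pvMax
  rw [pvRange_succ, List.foldl_append]
  rfl

lemma pvFilt_succ (s : List Int) (t : List String) (M : Int) (n : Nat) :
    pvFilt s t M (n + 1) = if pvV s n = M then pvFilt s t M n ++ [pvT t n] else pvFilt s t M n := by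
  unfold pvFilt
  rw [pvRange_succ, List.foldl_append]
  rfl

lemma pvB_succ (s : List Int) (t : List String) (n : Nat) :
    pvB s t (n + 1) =
      (if pvV s n > (pvB s t n).1 then (pvV s n, [pvT t n])
       else if pvV s n = (pvB s t n).1 then ((pvB s t n).1, (pvB s t n).2 ++ [pvT t n])
       else pvB s t n) := by
  unfold pvB
  rw [pvRange_succ, List.foldl_append]
  rfl

lemma le_pvMax (s : List Int) {i n : Nat} (h : i < n) : pvV s i ≤ pvMax s n := by
  induction n with
  | zero => omega
  | succ n ih =>
    rw [pvMax_succ]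
    rcases Nat.lt_succ_iff_lt_or_eq.mp h with h' | h'
    · have := ih h'
      split_ifs <;> omega
    · subst h'
      split_ifs <;> omega

lemma pvFilt_nil (s : List Int) (t : List String) (M : Int) (n : Nat)
    (h : ∀ i : Nat, i < n → pvV s i ≠ M) : pvFilt s t M n = [] := by
  induction n with
  | zero => rfl
  | succ n ih =>
    rw [pvFilt_succ]
    rw [if_neg (h n (by omega))]
    exact ih (fun i hi => h i (by omega))

lemma pvB_eq (s : List Int) (t : List String) (n : Nat) :
    pvB s t n = (pvMax s n, pvFilt s t (pvMax s n) n) := by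
  induction n with
  | zero => rfl
  | succ n ih =>
    rw [pvB_succ, ih, pvMax_succ]
    by_cases hgt : pvV s n > pvMax s n
    · rw [if_pos hgt, if_pos hgt]
      have hnil : pvFilt s t (pvV s n) n = [] :=
        pvFilt_nil s t _ n (fun i hi => by have := le_pvMax s hi; omega)
      rw [pvFilt_succ, if_pos rfl, hnil]
      simp
    · rw [if_neg hgt, if_neg hgt]
      by_cases heq : pvV s n = pvMax s n
      · rw [if_pos heq, pvFilt_succ, if_pos heq]
      · rw [if_neg heq, pvFilt_succ, if_neg heq]

lemma bestsell_time_eq (s : List Int) (t : List String) :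
    bestsell_time s t = pvFilt s t (pvMax s s.length) s.length := rfl

lemma bestsell_time_alt_eq (s : List Int) (t : List String) :
    bestsell_time_alt s t = (pvB s t s.length).2 := by
  simp only [bestsell_time_alt, pvB, pvV, pvT]

-- ===== VERDICT (by name: the statement is the Claim_ definition above) =====
theorem bestsell_time_spec : Claim_equal_bestsell_time := by
  intro s t _ _
  show bestsell_time s t = bestsell_time_alt s t
  rw [bestsell_time_eq, bestsell_time_alt_eq, pvB_eq]
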